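-- pv_equiv track=rewrite | github.com/Orderlee/pipeline | src/python/local_duckdb_to_motherduck_sync.py | _normalize_sync_tables
-- ===== SOURCE A (Python) =====
-- from typing import Optional
--
-- MVP_TABLES = [
--     "raw_files",
--     "image_metadata",
--     "video_metadata",
--     "labels",
--     "processed_clips",
--     "datasets",
--     "dataset_clips",
--     "image_labels",
-- ]
--
-- def _normalize_sync_tables(tables: Optional[list[str]]) -> list[str]:
--     """사용자 요청 동기화 테이블 정규화/검증."""
--     if not tables:
--         return list(MVP_TABLES)
--
--     normalized: list[str] = []
--     seen: set[str] = set()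
--     invalid: list[str] = []
--     valid_set = set(MVP_TABLES)
--
--     for raw in tables:
--         table = str(raw).strip()
--         if not table:
--             continue
--         if table not in valid_set:
--             invalid.append(table)
--             continue
--         if table in seen:
--             continue
--         normalized.append(table)
--         seen.add(table)
--
--     if invalid:
--         raise ValueError(
--             "Invalid table(s): "
--             + ", ".join(sorted(set(invalid)))
--             + f". Allowed: {', '.join(MVP_TABLES)}"
--         )
--
--     if not normalized:
--         raise ValueError("No valid table selected for sync.")
--
--     return normalized
-- ===== SOURCE B (Python) =====
-- from typing import Optional
--
-- MVP_TABLES = [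
--     "raw_files",
--     "image_metadata",
--     "video_metadata",
--     "labels",
--     "processed_clips",
--     "datasets",
--     "dataset_clips",
--     "image_labels",
-- ]
--
-- def _normalize_sync_tables(tables: Optional[list[str]]) -> list[str]:
--     """Normalize/validate requested sync tables (partition/dedup passes)."""
--     if not tables:
--         return list(MVP_TABLES)
--
--     cleaned = [t for t in (str(r).strip() for r in tables) if t]
--     allowed = set(MVP_TABLES)
--
--     invalid = [t for t in cleaned if t not in allowed]
--     if invalid:
--         raise ValueError(
--             "Invalid table(s): "
--             + ", ".join(sorted(set(invalid)))
--             + f". Allowed: {', '.join(MVP_TABLES)}"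
--         )
--
--     result = list(dict.fromkeys(cleaned))
--     if not result:
--         raise ValueError("No valid table selected for sync.")
--     return result
-- ===== Notes on version B (the rewrite author's own statement) =====
-- stated objective: simpler
-- what changed: Replaces the single interleaved loop with explicit seen-set and three mutable accumulators by three separate declarative passes: clean/strip-filter, partition out invalid names, then order-preserving dedup via dict.fromkeys.
import Mathlib
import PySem

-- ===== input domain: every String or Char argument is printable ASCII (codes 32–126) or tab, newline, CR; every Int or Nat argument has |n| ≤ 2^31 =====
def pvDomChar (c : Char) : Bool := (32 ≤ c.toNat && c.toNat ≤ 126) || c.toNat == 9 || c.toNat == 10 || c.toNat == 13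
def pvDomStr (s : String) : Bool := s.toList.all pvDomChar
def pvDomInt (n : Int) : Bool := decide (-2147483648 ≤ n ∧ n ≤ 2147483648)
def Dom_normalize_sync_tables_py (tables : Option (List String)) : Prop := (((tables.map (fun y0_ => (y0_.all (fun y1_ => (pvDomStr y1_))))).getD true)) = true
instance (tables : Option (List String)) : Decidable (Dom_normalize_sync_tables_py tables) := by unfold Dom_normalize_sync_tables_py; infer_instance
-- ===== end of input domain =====

-- B is a simpler decomposition of A: clean pass, invalid partition pass, ordered dedup.
-- Equivalence is about the RETURN value; on inputs where A raises ValueError (excluded by Pre_) B raises too.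

-- ===== PORT A =====
def MVP_TABLES : List String :=
  ["raw_files", "image_metadata", "video_metadata", "labels",
   "processed_clips", "datasets", "dataset_clips", "image_labels"]

-- A's loop state: (normalized, seen, invalid)
def pvALoop : List String → List String × PySem.Set String × List String →
    List String × PySem.Set String × List String
  | [], st => st
  | raw :: rest, (normalized, seen, invalid) =>
    let table := PySem.Str.strip raw
    if table = "" then pvALoop rest (normalized, seen, invalid)
    else if ¬ PySem.Set.contains (PySem.Set.ofList MVP_TABLES) table then
      pvALoop rest (normalized, seen, invalid ++ [table])
    else if PySem.Set.contains seen table then pvALoop rest (normalized, seen, invalid)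
    else pvALoop rest (normalized ++ [table], PySem.Set.add seen table, invalid)

def normalize_sync_tables_py (tables : Option (List String)) : List String :=
  match tables with
  | none => MVP_TABLES
  | some ts =>
    if ts = [] then MVP_TABLES          -- 'if not tables'
    else
      let st := pvALoop ts ([], PySem.Set.empty, [])
      if st.2.2 ≠ [] then []            -- raise ValueError "Invalid table(s): …" (outside Pre_)
      else if st.1 = [] then []         -- raise ValueError "No valid table selected" (outside Pre_)
      else st.1

-- ===== PORT B =====
def normalize_sync_tables_py_alt (tables : Option (List String)) : List String :=
  match tables with
  | none => MVP_TABLES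
  | some ts =>
    if ts = [] then MVP_TABLES
    else
      let cleaned := (ts.map PySem.Str.strip).filter (fun t => t ≠ "")
      let allowed := PySem.Set.ofList MVP_TABLES
      let invalid := cleaned.filter (fun t => ¬ PySem.Set.contains allowed t)
      if invalid ≠ [] then []           -- raise ValueError "Invalid table(s): …" (outside Pre_)
      else
        let result := PySem.List.dedup cleaned
        if result = [] then []          -- raise ValueError "No valid table selected" (outside Pre_)
        else result

-- ===== PRECONDITION & SPEC =====
-- Pre_ excludes exactly the inputs on which A raises ValueError: a non-empty list containing
-- a stripped-nonempty name outside MVP_TABLES, or one whose entries all strip to "".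
def Pre_normalize_sync_tables_py (tables : Option (List String)) : Prop :=
  match tables with
  | none => True
  | some ts =>
    ts = [] ∨
      ((∀ t ∈ (ts.map PySem.Str.strip).filter (fun t => t ≠ ""), t ∈ MVP_TABLES) ∧
       (ts.map PySem.Str.strip).filter (fun t => t ≠ "") ≠ [])
instance (tables : Option (List String)) : Decidable (Pre_normalize_sync_tables_py tables) := by
  unfold Pre_normalize_sync_tables_py; rcases tables with _ | ts <;> infer_instance
def pvWitness_normalize_sync_tables_py : Option (List String) := some ["labels ", "labels", "datasets"]
def Spec_normalize_sync_tables_py (tables : Option (List String)) (out : List String) : Prop := out = normalize_sync_tables_py_alt tables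
instance (tables : Option (List String)) (out : List String) : Decidable (Spec_normalize_sync_tables_py tables out) := by unfold Spec_normalize_sync_tables_py; infer_instance

-- ===== CLAIM (what is proved, stated in full; the proofs are below) =====
def Claim_equal_normalize_sync_tables_py : Prop := ∀ (tables : Option (List String)), Dom_normalize_sync_tables_py tables → Pre_normalize_sync_tables_py tables → Spec_normalize_sync_tables_py tables (normalize_sync_tables_py tables)

-- ===== LEMMAS AND PROOFS =====

-- With seen = normalized (A maintains them in lockstep) and all valid entries,
-- A's loop is foldl Set.add over the cleaned list and never touches invalid.
-- With seen = normalized (A maintains them in lockstep) and all valid entries,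
-- A's loop is foldl Set.add over the cleaned list and never touches invalid.
theorem pvALoop_eq (ts : List String) (acc inv : List String)
    (h : ∀ t ∈ (ts.map PySem.Str.strip).filter (fun t => t ≠ ""), t ∈ MVP_TABLES) :
    pvALoop ts (acc, acc, inv) =
      (((ts.map PySem.Str.strip).filter (fun t => t ≠ "")).foldl PySem.Set.add acc,
       ((ts.map PySem.Str.strip).filter (fun t => t ≠ "")).foldl PySem.Set.add acc, inv) := by
  induction ts generalizing acc with
  | nil => rfl
  | cons raw rest ih =>
    simp only [List.map_cons] at h ⊢
    by_cases he : PySem.Str.strip raw = ""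
    · rw [List.filter_cons_of_neg (by simp [he])] at h ⊢
      rw [pvALoop]
      simp only [if_pos he]
      exact ih acc h
    · rw [List.filter_cons_of_pos (by simp [he])] at h ⊢
      obtain ⟨hmem, hrest⟩ := List.forall_mem_cons.mp h
      rw [pvALoop]
      simp only [if_neg he]
      rw [if_neg (by simp [PySem.Set.mem_ofList, hmem])]
      by_cases hs : PySem.Set.contains acc (PySem.Str.strip raw)
      · have hin : PySem.Str.strip raw ∈ acc := by simpa using hs
        have hadd : PySem.Set.add acc (PySem.Str.strip raw) = acc := by
          simp [PySem.Set.add, hin]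
        rw [if_pos hs, ih acc hrest, List.foldl_cons, hadd]
      · have hnin : PySem.Str.strip raw ∉ acc := by simpa using hs
        have hadd : PySem.Set.add acc (PySem.Str.strip raw) = acc ++ [PySem.Str.strip raw] := by
          simp [PySem.Set.add, hnin]
        rw [if_neg hs, List.foldl_cons, ← hadd, ih _ hrest]

-- ===== VERDICT (by name: the statement is the Claim_ definition above) =====
theorem normalize_sync_tables_py_spec : Claim_equal_normalize_sync_tables_py := by
  intro tables _ hpre
  unfold Spec_normalize_sync_tables_py
  rcases tables with _ | ts
  · rfl
  · by_cases hnil : ts = []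
    · simp [normalize_sync_tables_py, normalize_sync_tables_py_alt, hnil]
    · rcases hpre with h | ⟨hall, hne⟩
      · exact absurd h hnil
      set cleaned := (ts.map PySem.Str.strip).filter (fun t => t ≠ "") with hc
      have hinv : cleaned.filter (fun t => ¬ PySem.Set.contains (PySem.Set.ofList MVP_TABLES) t) = [] := by
        rw [List.filter_eq_nil_iff]
        intro t ht
        simp [PySem.Set.mem_ofList, hall t ht]
      have hloop := pvALoop_eq ts [] [] hall
      have hded : PySem.List.dedup cleaned = cleaned.foldl PySem.Set.add [] := by
        rw [PySem.List.dedup_eq_ofList, PySem.Set.ofList_eq_foldl]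
      simp only [normalize_sync_tables_py, normalize_sync_tables_py_alt, if_neg hnil, ← hc,
        hinv, hded]
      have hemp : (PySem.Set.empty : PySem.Set String) = [] := rfl
      rw [hemp, hloop, ← hc]
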